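-- pv_equiv track=rewrite | github.com/learod/ulauncher-toggl-extension | ulauncher_toggl_extension/toggl/toggl_cli.py | count_table
-- ===== SOURCE A (Python) =====
-- def count_table(header: str) -> list[int]:
--     RIGHT_ALIGNED = {"start", "stop", "duration"}
--
--     count = []
--     current_word = ""
--
--     for index, letter in enumerate(header):
--         right = current_word.strip().lower() in RIGHT_ALIGNED
--
--         if (
--             not right
--             and current_word
--             and current_word[-1] == " "
--             and letter != " "
--             and any(x.isalpha() for x in current_word)
--         ):
--             current_word = ""
--             count.append(index)
--
--         elif right and current_word[-1] != " " and letter == " ":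
--             current_word = ""
--             count.append(index)
--
--         current_word += letter
--
--     return count
-- ===== SOURCE B (Python) =====
-- def count_table(header: str) -> list[int]:
--     RIGHT_ALIGNED = ("start", "stop", "duration")
--
--     count = []
--     core = ""          # lowercased, whitespace-stripped current word (valid while not dead)
--     dead = False       # True once the stripped current word contains internal whitespace
--     last = ""          # last character of the current word ("" when the word is empty)
--     has_alpha = False  # whether the current word contains an alphabetic character
--
--     for index, letter in enumerate(header):
--         right = not dead and core in RIGHT_ALIGNED
--
--         if not right and last == " " and letter != " " and has_alpha:
--             core, dead, last, has_alpha = "", False, "", False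
--             count.append(index)
--         elif right and last != " " and letter == " ":
--             core, dead, last, has_alpha = "", False, "", False
--             count.append(index)
--
--         if not letter.isspace():
--             if core and last.isspace():
--                 dead = True
--             elif not dead:
--                 core += letter.lower()
--         last = letter
--         has_alpha = has_alpha or letter.isalpha()
--
--     return count
-- ===== Notes on version B (the rewrite author's own statement) =====
-- stated objective: faster
-- what changed: B replaces A's per-character rescans of current_word (strip().lower() set membership, [-1] access via a kept buffer, any(isalpha)) with O(1) incremental state: the lowercased stripped core, a dead flag set once internal whitespace makes a right-aligned match impossible, the last character and a has-alpha flag, giving one linear pass.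
import Mathlib
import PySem

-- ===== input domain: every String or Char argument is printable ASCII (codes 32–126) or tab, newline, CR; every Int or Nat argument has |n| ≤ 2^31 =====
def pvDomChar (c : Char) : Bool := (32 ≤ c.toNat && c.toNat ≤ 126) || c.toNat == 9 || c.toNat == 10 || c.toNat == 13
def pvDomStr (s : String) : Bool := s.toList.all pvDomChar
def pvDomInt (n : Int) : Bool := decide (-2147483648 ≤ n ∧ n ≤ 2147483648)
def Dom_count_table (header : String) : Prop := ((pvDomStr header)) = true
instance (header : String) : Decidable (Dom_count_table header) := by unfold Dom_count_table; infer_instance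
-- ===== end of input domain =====

-- B replaces A's per-character rescan of current_word (strip/lower/membership/any-isalpha) by O(1)
-- incremental flags, making one linear pass; return values are identical on all strings.

-- ===== PORT A =====
-- right = current_word.strip().lower() in {"start", "stop", "duration"}
def ctRightA (cw : List Char) : Bool :=
  let w := PySem.Chars.lower (PySem.Chars.strip cw)
  w == "start".toList || w == "stop".toList || w == "duration".toList

-- one iteration of A's loop; state = (count, current_word), p = (index, letter)
def ctA_step (st : List Int × List Char) (p : Int × Char) : List Int × List Char :=
  let right := ctRightA st.2
  let st' :=
    if !right && !st.2.isEmpty && (st.2.getLast? == some ' ') && (p.2 != ' ')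
        && st.2.any PySem.Chars.isalpha then
      (st.1 ++ [p.1], ([] : List Char))
    else if right && (st.2.getLast? != some ' ') && (p.2 == ' ') then
      (st.1 ++ [p.1], ([] : List Char))
    else st
  (st'.1, st'.2 ++ [p.2])

def count_table (header : String) : List Int :=
  ((PySem.List.enumerate header.toList 0).foldl ctA_step ([], [])).1

-- ===== PORT B =====
-- B's loop state: count, core = lowercased stripped current word, dead, last char, has-alpha flag
structure CtState where
  count : List Int
  core : List Char
  dead : Bool
  last : Option Char
  hasAlpha : Bool
deriving Repr, DecidableEq

-- last.isspace() where last is "" or a single character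
def ctLastIsSpace (last : Option Char) : Bool :=
  match last with
  | some c => PySem.Chars.isspace c
  | none => false

-- the tail of B's loop body: absorb the letter into the incremental flags
def ctAbsorb (st : CtState) (c : Char) : CtState :=
  let st' :=
    if !PySem.Chars.isspace c then
      if !st.core.isEmpty && ctLastIsSpace st.last then { st with dead := true }
      else if !st.dead then { st with core := st.core ++ [PySem.Chars.lowerChar c] }
      else st
    else st
  { st' with last := some c, hasAlpha := st'.hasAlpha || PySem.Chars.isalpha c }

-- one iteration of B's loop; p = (index, letter)
def ctB_step (st : CtState) (p : Int × Char) : CtState :=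
  let right := !st.dead
    && (st.core == "start".toList || st.core == "stop".toList || st.core == "duration".toList)
  let st' :=
    if !right && (st.last == some ' ') && (p.2 != ' ') && st.hasAlpha then
      { count := st.count ++ [p.1], core := [], dead := false, last := none, hasAlpha := false }
    else if right && (st.last != some ' ') && (p.2 == ' ') then
      { count := st.count ++ [p.1], core := [], dead := false, last := none, hasAlpha := false }
    else st
  ctAbsorb st' p.2

def count_table_alt (header : String) : List Int :=
  ((PySem.List.enumerate header.toList 0).foldl ctB_step ⟨[], [], false, none, false⟩).count

-- ===== PRECONDITION & SPEC =====
def Spec_count_table (header : String) (out : List Int) : Prop := out = count_table_alt header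
instance (header : String) (out : List Int) : Decidable (Spec_count_table header out) := by unfold Spec_count_table; infer_instance

-- ===== CLAIM (what is proved, stated in full; the proofs are below) =====
def Claim_equal_count_table : Prop := ∀ (header : String), Dom_count_table header → Spec_count_table header (count_table header)

-- ===== LEMMAS AND PROOFS =====

-- the invariant tying B's incremental state to A's current_word
def CtInv (cw : List Char) (st : CtState) : Prop :=
  st.last = cw.getLast? ∧
  st.hasAlpha = cw.any PySem.Chars.isalpha ∧
  (st.dead = false → st.core = PySem.Chars.lower (PySem.Chars.strip cw)) ∧
  (st.dead = true → ∃ c ∈ PySem.Chars.strip cw, PySem.Chars.isspace c = true)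

lemma ct_isupper_false_of_isspace (c : Char) (h : PySem.Chars.isspace c = true) :
    PySem.Chars.isupper c = false := by
  simp only [PySem.Chars.isspace, Char.toNat] at h
  simp only [PySem.Chars.isupper, Char.le_def, Bool.and_eq_false_iff, decide_eq_false_iff_not]
  simp only [Bool.or_eq_true, decide_eq_true_eq, Bool.and_eq_true] at h
  simp only [UInt32.le_iff_toNat_le]
  have hA : 'A'.val.toNat = 65 := rfl
  have hZ : 'Z'.val.toNat = 90 := rfl
  show _ ∨ _
  omega

lemma ct_lowerChar_of_isspace (c : Char) (h : PySem.Chars.isspace c = true) :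
    PySem.Chars.lowerChar c = c := by
  simp [PySem.Chars.lowerChar, ct_isupper_false_of_isspace c h]

lemma ct_getLast?_dropWhile (p : Char → Bool) (l : List Char) (h : l.dropWhile p ≠ []) :
    (l.dropWhile p).getLast? = l.getLast? := by
  conv_rhs => rw [← List.takeWhile_append_dropWhile (p := p) (l := l)]
  exact (List.getLast?_append_of_ne_nil _ h).symm

lemma ct_mem_lstrip_of_mem_strip (l : List Char) (c : Char) (h : c ∈ PySem.Chars.strip l) :
    c ∈ PySem.Chars.lstrip l := by
  simp only [PySem.Chars.strip, PySem.Chars.rstrip, List.mem_reverse] at h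
  have := (List.dropWhile_sublist _).mem h
  simpa using this

lemma ct_rstrip_concat_ws (l : List Char) (c : Char) (h : PySem.Chars.isspace c = true) :
    PySem.Chars.rstrip (l ++ [c]) = PySem.Chars.rstrip l := by
  simp [PySem.Chars.rstrip, h]

lemma ct_rstrip_concat_nonws (l : List Char) (c : Char) (h : PySem.Chars.isspace c = false) :
    PySem.Chars.rstrip (l ++ [c]) = l ++ [c] := by
  simp [PySem.Chars.rstrip, h]

lemma ct_strip_concat_ws (l : List Char) (c : Char) (h : PySem.Chars.isspace c = true) :
    PySem.Chars.strip (l ++ [c]) = PySem.Chars.strip l := by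
  simp only [PySem.Chars.strip, PySem.Chars.lstrip, List.dropWhile_append]
  by_cases he : (l.dropWhile PySem.Chars.isspace).isEmpty
  · rw [if_pos he, List.isEmpty_iff.mp he]
    simp [PySem.Chars.rstrip, h]
  · rw [if_neg he]
    exact ct_rstrip_concat_ws _ _ h

lemma ct_strip_concat_nonws (l : List Char) (c : Char) (h : PySem.Chars.isspace c = false) :
    PySem.Chars.strip (l ++ [c]) = PySem.Chars.lstrip l ++ [c] := by
  simp only [PySem.Chars.strip, PySem.Chars.lstrip, List.dropWhile_append]
  by_cases he : (l.dropWhile PySem.Chars.isspace).isEmpty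
  · rw [if_pos he, List.isEmpty_iff.mp he]
    simp [PySem.Chars.rstrip, h]
  · rw [if_neg he]
    exact ct_rstrip_concat_nonws _ _ h

lemma ct_rstrip_eq_self (l : List Char) (d : Char) (hl : l.getLast? = some d)
    (hd : PySem.Chars.isspace d = false) : PySem.Chars.rstrip l = l := by
  have hrev : l.reverse.head? = some d := by
    rw [List.head?_reverse]; exact hl
  unfold PySem.Chars.rstrip
  cases hr : l.reverse with
  | nil => simp [hr] at hrev
  | cons x t =>
    rw [hr] at hrev
    simp only [List.head?_cons, Option.some.injEq] at hrev
    subst hrev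
    rw [List.dropWhile_cons, hd]
    simp [← hr]

lemma ct_lstrip_ne_nil (l : List Char) (d : Char) (hl : l.getLast? = some d)
    (hd : PySem.Chars.isspace d = false) : PySem.Chars.lstrip l ≠ [] := by
  intro h0
  have hmem : d ∈ l := List.mem_of_getLast? hl
  have : PySem.Chars.isspace d = true := List.dropWhile_eq_nil_iff.mp h0 d hmem
  simp [this] at hd

lemma ct_strip_eq_lstrip (l : List Char) (d : Char) (hl : l.getLast? = some d)
    (hd : PySem.Chars.isspace d = false) :
    PySem.Chars.strip l = PySem.Chars.lstrip l ∧ (PySem.Chars.lstrip l).getLast? = some d := by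
  have hne := ct_lstrip_ne_nil l d hl hd
  have hlast : (PySem.Chars.lstrip l).getLast? = some d := by
    rw [PySem.Chars.lstrip, ct_getLast?_dropWhile _ _ hne]; exact hl
  exact ⟨ct_rstrip_eq_self _ d hlast hd, hlast⟩

-- record-field shapes of ctAbsorb
lemma ctAbsorb_last (st : CtState) (c : Char) : (ctAbsorb st c).last = some c := rfl

lemma ctAbsorb_count (st : CtState) (c : Char) : (ctAbsorb st c).count = st.count := by
  unfold ctAbsorb
  dsimp only
  split <;> [skip; rfl]
  split <;> [rfl; skip]
  split <;> rfl

lemma ctAbsorb_hasAlpha (st : CtState) (c : Char) :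
    (ctAbsorb st c).hasAlpha = (st.hasAlpha || PySem.Chars.isalpha c) := by
  unfold ctAbsorb
  dsimp only
  split <;> [skip; rfl]
  split <;> [rfl; skip]
  split <;> rfl

lemma ctAbsorb_ws (st : CtState) (c : Char) (h : PySem.Chars.isspace c = true) :
    (ctAbsorb st c).dead = st.dead ∧ (ctAbsorb st c).core = st.core := by
  unfold ctAbsorb; simp [h]

lemma ctAbsorb_dead1 (st : CtState) (c : Char) (h : PySem.Chars.isspace c = false)
    (h2 : (!st.core.isEmpty && ctLastIsSpace st.last) = true) :
    (ctAbsorb st c).dead = true ∧ (ctAbsorb st c).core = st.core := by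
  unfold ctAbsorb; simp [h, h2]

lemma ctAbsorb_grow (st : CtState) (c : Char) (h : PySem.Chars.isspace c = false)
    (h2 : (!st.core.isEmpty && ctLastIsSpace st.last) = false) (h3 : st.dead = false) :
    (ctAbsorb st c).dead = false ∧
      (ctAbsorb st c).core = st.core ++ [PySem.Chars.lowerChar c] := by
  unfold ctAbsorb; simp [h, h2, h3]

lemma ctAbsorb_dead2 (st : CtState) (c : Char) (h : PySem.Chars.isspace c = false)
    (h2 : (!st.core.isEmpty && ctLastIsSpace st.last) = false) (h3 : st.dead = true) :
    (ctAbsorb st c).dead = true ∧ (ctAbsorb st c).core = st.core := by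
  unfold ctAbsorb; simp [h, h2, h3]

-- a word whose strip contains whitespace is never right-aligned
lemma ct_right_false_of_dead (cw : List Char)
    (h : ∃ c ∈ PySem.Chars.strip cw, PySem.Chars.isspace c = true) : ctRightA cw = false := by
  obtain ⟨s, hs, hws⟩ := h
  have hmem : s ∈ PySem.Chars.lower (PySem.Chars.strip cw) := by
    have := List.mem_map_of_mem (f := PySem.Chars.lowerChar) hs
    rwa [ct_lowerChar_of_isspace s hws] at this
  unfold ctRightA
  simp only [Bool.or_eq_false_iff, beq_eq_false_iff_ne]
  refine ⟨⟨fun he => ?_, fun he => ?_⟩, fun he => ?_⟩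
  · rw [he, show "start".toList = ['s','t','a','r','t'] from rfl] at hmem
    fin_cases hmem <;> exact absurd hws (by decide)
  · rw [he, show "stop".toList = ['s','t','o','p'] from rfl] at hmem
    fin_cases hmem <;> exact absurd hws (by decide)
  · rw [he, show "duration".toList = ['d','u','r','a','t','i','o','n'] from rfl] at hmem
    fin_cases hmem <;> exact absurd hws (by decide)

-- reset state satisfies the invariant for the empty word
lemma ct_inv_nil (acc : List Int) : CtInv [] ⟨acc, [], false, none, false⟩ := by
  simp [CtInv, PySem.Chars.strip, PySem.Chars.lstrip, PySem.Chars.rstrip, PySem.Chars.lower]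

-- absorbing one letter preserves the invariant
lemma ct_inv_absorb (cw : List Char) (st : CtState) (c : Char) (h : CtInv cw st) :
    CtInv (cw ++ [c]) (ctAbsorb st c) := by
  obtain ⟨hl, ha, hcore, hdead⟩ := h
  have key : ((ctAbsorb st c).dead = false →
        (ctAbsorb st c).core = PySem.Chars.lower (PySem.Chars.strip (cw ++ [c]))) ∧
      ((ctAbsorb st c).dead = true →
        ∃ x ∈ PySem.Chars.strip (cw ++ [c]), PySem.Chars.isspace x = true) := by
    by_cases hws : PySem.Chars.isspace c = true
    · obtain ⟨hD, hC⟩ := ctAbsorb_ws st c hws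
      rw [hD, hC, ct_strip_concat_ws cw c hws]
      exact ⟨hcore, hdead⟩
    · have hws' : PySem.Chars.isspace c = false := by simpa using hws
      have hstrip := ct_strip_concat_nonws cw c hws'
      cases hcase : (!st.core.isEmpty && ctLastIsSpace st.last) with
      | true =>
        obtain ⟨hD, hC⟩ := ctAbsorb_dead1 st c hws' hcase
        rw [hD, hstrip]
        refine ⟨fun h0 => by simp at h0, fun _ => ?_⟩
        obtain ⟨hce, hlw⟩ := Bool.and_eq_true_iff.mp hcase
        obtain ⟨d, hld⟩ : ∃ d, st.last = some d := by
          cases hv : st.last with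
          | none => rw [hv] at hlw; simp [ctLastIsSpace] at hlw
          | some d => exact ⟨d, rfl⟩
        rw [hld] at hlw
        have hdw : PySem.Chars.isspace d = true := by simpa [ctLastIsSpace] using hlw
        cases hdd : st.dead with
        | false =>
          have hc := hcore hdd
          have hsne : PySem.Chars.strip cw ≠ [] := by
            intro h0
            rw [h0] at hc
            simp only [PySem.Chars.lower, List.map_nil] at hc
            rw [hc] at hce
            simp at hce
          have hlne : PySem.Chars.lstrip cw ≠ [] := by
            intro h0
            apply hsne
            simp [PySem.Chars.strip, h0, PySem.Chars.rstrip]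
          have hll : (PySem.Chars.lstrip cw).getLast? = some d := by
            rw [PySem.Chars.lstrip, ct_getLast?_dropWhile _ _ hlne, ← hl, hld]
          exact ⟨d, List.mem_append.mpr (Or.inl (List.mem_of_getLast? hll)), hdw⟩
        | true =>
          obtain ⟨s, hs, hsw⟩ := hdead hdd
          exact ⟨s, List.mem_append.mpr (Or.inl (ct_mem_lstrip_of_mem_strip cw s hs)), hsw⟩
      | false =>
        cases hdd : st.dead with
        | false =>
          obtain ⟨hD, hC⟩ := ctAbsorb_grow st c hws' hcase hdd
          rw [hD, hC, hstrip]
          refine ⟨fun _ => ?_, fun h0 => by simp at h0⟩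
          simp only [PySem.Chars.lower, List.map_append, List.map_cons, List.map_nil]
          have hc := hcore hdd
          by_cases hcn : st.core = []
          · rw [hcn] at hc ⊢
            have hsn : PySem.Chars.strip cw = [] := by
              cases hsv : PySem.Chars.strip cw with
              | nil => rfl
              | cons x t => rw [hsv] at hc; simp [PySem.Chars.lower] at hc
            have hln : PySem.Chars.lstrip cw = [] := by
              cases hlv : PySem.Chars.lstrip cw with
              | nil => rfl
              | cons x t =>
                have hx : PySem.Chars.isspace x = false := by
                  have := List.head?_dropWhile_not PySem.Chars.isspace cw
                  rw [show cw.dropWhile PySem.Chars.isspace = x :: t from hlv] at this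
                  simpa using this
                have hre : PySem.Chars.rstrip (x :: t) = [] := by
                  rw [← hlv, ← PySem.Chars.strip]
                  exact hsn
                have hrev : List.dropWhile PySem.Chars.isspace (x :: t).reverse = [] := by
                  simpa [PySem.Chars.rstrip, List.reverse_eq_nil_iff] using hre
                have hxw := List.dropWhile_eq_nil_iff.mp hrev x (by simp)
                rw [hx] at hxw
                exact absurd hxw (by simp)
            rw [hln]
            simp
          · have hlsw : ctLastIsSpace st.last = false := by
              cases hv : (ctLastIsSpace st.last) with
              | false => rfl
              | true =>
                exfalso
                rw [Bool.and_eq_false_iff] at hcase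
                rcases hcase with h0 | h0
                · simp only [Bool.not_eq_false', List.isEmpty_iff] at h0
                  exact hcn h0
                · rw [hv] at h0; simp at h0
            obtain ⟨d, hld⟩ : ∃ d, st.last = some d := by
              cases hv : st.last with
              | none =>
                exfalso
                rw [hv] at hl
                have hnil : cw = [] := by
                  cases hcw : cw with
                  | nil => rfl
                  | cons x t =>
                    rw [hcw] at hl
                    rw [List.getLast?_eq_head?_reverse] at hl
                    simp at hl
                rw [hnil] at hc
                simp [PySem.Chars.strip, PySem.Chars.lstrip, PySem.Chars.rstrip,
                  PySem.Chars.lower] at hc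
                exact hcn hc
              | some d => exact ⟨d, rfl⟩
            have hdw : PySem.Chars.isspace d = false := by
              rw [hld] at hlsw; simpa [ctLastIsSpace] using hlsw
            have hcwlast : cw.getLast? = some d := by rw [← hl, hld]
            rw [hc, (ct_strip_eq_lstrip cw d hcwlast hdw).1]
            simp [PySem.Chars.lower]
        | true =>
          obtain ⟨hD, hC⟩ := ctAbsorb_dead2 st c hws' hcase hdd
          rw [hD, hstrip]
          refine ⟨fun h0 => by simp at h0, fun _ => ?_⟩
          obtain ⟨s, hs, hsw⟩ := hdead hdd
          exact ⟨s, List.mem_append.mpr (Or.inl (ct_mem_lstrip_of_mem_strip cw s hs)), hsw⟩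
  exact ⟨by rw [ctAbsorb_last, List.getLast?_concat],
    by rw [ctAbsorb_hasAlpha, ha, List.any_append]; simp, key.1, key.2⟩

-- B's right flag computes A's right
lemma ct_right_eq (cw : List Char) (st : CtState) (h : CtInv cw st) :
    (!st.dead && (st.core == "start".toList || st.core == "stop".toList
      || st.core == "duration".toList)) = ctRightA cw := by
  obtain ⟨_, _, hcore, hdead⟩ := h
  cases hdd : st.dead with
  | false => rw [hcore hdd]; simp [ctRightA]
  | true => simp [ct_right_false_of_dead cw (hdead hdd)]

-- one loop iteration: counts stay equal and the invariant is preserved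
lemma ct_step (acc : List Int) (cw : List Char) (st : CtState) (i : Int) (c : Char)
    (hc : st.count = acc) (h : CtInv cw st) :
    (ctB_step st (i, c)).count = (ctA_step (acc, cw) (i, c)).1 ∧
      CtInv (ctA_step (acc, cw) (i, c)).2 (ctB_step st (i, c)) := by
  have hright := ct_right_eq cw st h
  obtain ⟨hl, ha, hcore, hdead⟩ := h
  have hb1 : (!ctRightA cw && (st.last == some ' ') && (c != ' ') && st.hasAlpha)
      = (!ctRightA cw && !cw.isEmpty && (cw.getLast? == some ' ') && (c != ' ')
          && cw.any PySem.Chars.isalpha) := by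
    rw [hl, ha]
    cases cw with
    | nil => simp
    | cons x t => simp [Bool.and_comm, Bool.and_assoc]
  have hb2 : (ctRightA cw && (st.last != some ' ') && (c == ' '))
      = (ctRightA cw && (cw.getLast? != some ' ') && (c == ' ')) := by rw [hl]
  unfold ctB_step ctA_step
  dsimp only
  rw [hright, hb1, hb2]
  cases h1 : (!ctRightA cw && !cw.isEmpty && (cw.getLast? == some ' ') && (c != ' ')
      && cw.any PySem.Chars.isalpha) with
  | true =>
    exact ⟨by rw [ctAbsorb_count]; simp [hc], ct_inv_absorb [] _ c (ct_inv_nil _)⟩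
  | false =>
    simp only [Bool.false_eq_true, if_false]
    cases h2 : (ctRightA cw && (cw.getLast? != some ' ') && (c == ' ')) with
    | true =>
      exact ⟨by rw [ctAbsorb_count]; simp [hc], ct_inv_absorb [] _ c (ct_inv_nil _)⟩
    | false =>
      simp only [Bool.false_eq_true, if_false]
      exact ⟨by rw [ctAbsorb_count]; simp [hc], ct_inv_absorb cw st c ⟨hl, ha, hcore, hdead⟩⟩

lemma ct_loop (l : List (Int × Char)) (acc : List Int) (cw : List Char) (st : CtState)
    (hc : st.count = acc) (h : CtInv cw st) :
    (l.foldl ctB_step st).count = (l.foldl ctA_step (acc, cw)).1 := by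
  induction l generalizing acc cw st with
  | nil => simpa using hc
  | cons p t ih =>
    obtain ⟨i, c⟩ := p
    simp only [List.foldl_cons]
    obtain ⟨h1, h2⟩ := ct_step acc cw st i c hc h
    exact ih _ _ _ h1 h2

-- ===== VERDICT (by name: the statement is the Claim_ definition above) =====
theorem count_table_spec : Claim_equal_count_table := by
  intro header _
  unfold Spec_count_table count_table count_table_alt
  exact (ct_loop _ [] [] _ rfl (ct_inv_nil [])).symm
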